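-- pv_equiv track=rewrite | github.com/mutjin08/this_is_coding_test | ch11_그리디/01_모험가 길드.py | solution
-- ===== SOURCE A (Python) =====
-- def solution(n, afs):
--     group, member = 0, 0
--     afs.sort()
--
--     for af in afs:
--         member += 1
--         if member >= af:
--             group += 1
--             member = 0
--
--     return group
-- ===== SOURCE B (Python) =====
-- from itertools import groupby
--
-- def solution(n, afs):
--     afs.sort()
--     group = member = 0
--     for f, run in groupby(afs):
--         c = sum(1 for _ in run)
--         if f <= 0:
--             # a non-positive fear level is met by any single adventurer
--             group += c
--             member = 0
--         else:
--             group += (member + c) // f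
--             member = (member + c) % f
--     return group
-- ===== Notes on version B (the rewrite author's own statement) =====
-- stated objective: alternative
-- what changed: B replaces A's per-adventurer counting loop with a pass over the consecutive equal-fear runs of the sorted list (itertools.groupby), closing each run arithmetically with one division/modulus per distinct fear level while carrying the leftover members.
import Mathlib
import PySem

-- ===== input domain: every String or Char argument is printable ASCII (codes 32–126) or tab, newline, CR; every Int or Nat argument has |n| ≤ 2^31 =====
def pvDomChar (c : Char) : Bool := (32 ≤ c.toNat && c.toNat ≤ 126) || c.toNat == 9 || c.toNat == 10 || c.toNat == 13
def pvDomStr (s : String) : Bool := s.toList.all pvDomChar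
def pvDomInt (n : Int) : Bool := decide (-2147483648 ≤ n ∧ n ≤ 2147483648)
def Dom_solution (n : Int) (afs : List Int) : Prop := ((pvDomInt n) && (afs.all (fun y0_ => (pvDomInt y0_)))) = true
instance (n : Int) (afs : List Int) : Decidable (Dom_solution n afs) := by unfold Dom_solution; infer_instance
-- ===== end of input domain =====

-- B folds over the runs of equal fear levels in the sorted list instead of over single
-- adventurers (objective: alternative decomposition, same asymptotic cost).
-- Both A and B sort afs in place; the equivalence proved here is about the return value
-- (the mutation — sorting afs — is identical in A and B).

-- ===== PORT A =====
-- one iteration of A's for-loop: state (group, member), element af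
def astep (gm : Int × Int) (af : Int) : Int × Int :=
  let m := gm.2 + 1
  if af ≤ m then (gm.1 + 1, 0) else (gm.1, m)

def solution (n : Int) (afs : List Int) : Int :=
  let s := PySem.List.sorted afs (fun x => x) false
  (s.foldl astep (0, 0)).1

-- ===== PORT B =====
-- itertools.groupby over a sorted list: consecutive (value, run length) pairs
def runsB : List Int → List (Int × Int)
  | [] => []
  | a :: t =>
      (a, ((t.takeWhile (· == a)).length : Int) + 1) :: runsB (t.dropWhile (· == a))
termination_by l => l.length
decreasing_by
  have := (List.dropWhile_sublist (l := t) (p := (· == a))).length_le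
  simp
  omega

-- one iteration of B's for-loop over a (fear, count) run
def bstep (gm : Int × Int) (fc : Int × Int) : Int × Int :=
  if fc.1 ≤ 0 then (gm.1 + fc.2, 0)
  else (gm.1 + PySem.Int.floordiv (gm.2 + fc.2) fc.1, PySem.Int.mod (gm.2 + fc.2) fc.1)

def solution_alt (n : Int) (afs : List Int) : Int :=
  let s := PySem.List.sorted afs (fun x => x) false
  ((runsB s).foldl bstep (0, 0)).1

-- ===== PRECONDITION & SPEC =====
def Spec_solution (n : Int) (afs : List Int) (out : Int) : Prop := out = solution_alt n afs
instance (n : Int) (afs : List Int) (out : Int) : Decidable (Spec_solution n afs out) := by unfold Spec_solution; infer_instance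

-- ===== CLAIM (what is proved, stated in full; the proofs are below) =====
def Claim_equal_solution : Prop := ∀ (n : Int) (afs : List Int), Dom_solution n afs → Spec_solution n afs (solution n afs)

-- ===== LEMMAS AND PROOFS =====

-- A's loop over a run of c+1 copies of f equals one bstep, provided the carried member
-- count m is a valid remainder for every fear level ≥ f.
lemma run_lemma : ∀ (c : Nat) (f g m : Int), 0 ≤ m → (1 ≤ f → m < f) →
    (List.replicate (c + 1) f).foldl astep (g, m) = bstep (g, m) (f, (c : Int) + 1) := by
  intro c
  induction c with
  | zero =>
      intro f g m hm hmf
      by_cases hf : f ≤ 0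
      · simp [astep, bstep, hf]
        omega
      · have hf1 : 1 ≤ f := by omega
        have hmf' := hmf hf1
        by_cases hle : f ≤ m + 1
        · have : m + 1 = f := by omega
          simp [astep, bstep, hf, this,
            PySem.Int.floordiv_eq_ediv_of_pos (by omega : (0:Int) < f),
            PySem.Int.mod_eq_emod_of_pos (by omega : (0:Int) < f),
            Int.ediv_self (by omega : f ≠ 0)]
        · simp [astep, bstep, hf, hle,
            PySem.Int.floordiv_eq_ediv_of_pos (by omega : (0:Int) < f),
            PySem.Int.mod_eq_emod_of_pos (by omega : (0:Int) < f)]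
          constructor
          · exact Int.ediv_eq_zero_of_lt (by omega) (by omega)
          · exact (Int.emod_eq_of_lt (by omega) (by omega)).symm
  | succ c ih =>
      intro f g m hm hmf
      rw [List.replicate_succ, List.foldl_cons]
      by_cases hf : f ≤ 0
      · have hstep : astep (g, m) f = (g + 1, 0) := by simp [astep]; omega
        rw [hstep, ih f (g + 1) 0 le_rfl (by omega)]
        simp [bstep, hf]
        omega
      · have hf1 : 1 ≤ f := by omega
        have hmf' := hmf hf1
        have hfpos : (0:Int) < f := by omega
        by_cases hle : f ≤ m + 1
        · have hmf2 : m + 1 = f := by omega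
          have hstep : astep (g, m) f = (g + 1, 0) := by simp [astep, hle]
          rw [hstep, ih f (g + 1) 0 le_rfl (fun _ => hfpos)]
          simp only [bstep, if_neg (by omega : ¬ f ≤ 0)]
          rw [PySem.Int.floordiv_eq_ediv_of_pos hfpos, PySem.Int.floordiv_eq_ediv_of_pos hfpos,
            PySem.Int.mod_eq_emod_of_pos hfpos, PySem.Int.mod_eq_emod_of_pos hfpos]
          push_cast
          have h1 : m + ((c:Int) + 1 + 1) = (0 + ((c:Int) + 1)) + 1 * f := by omega
          rw [h1, Int.add_mul_ediv_right _ _ (by omega : f ≠ 0), Int.add_mul_emod_self_right]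
          simp only [Prod.mk.injEq]
          constructor
          · ring
          · trivial
        · have hstep : astep (g, m) f = (g, m + 1) := by simp [astep, hle]
          rw [hstep, ih f g (m + 1) (by omega) (fun _ => by omega)]
          simp only [bstep, if_neg (by omega : ¬ f ≤ 0)]
          push_cast
          ring_nf

-- elements of takeWhile (· == a) all equal a
lemma takeWhile_eq_replicate (a : Int) (t : List Int) :
    a :: t.takeWhile (· == a) = List.replicate ((t.takeWhile (· == a)).length + 1) a := by
  rw [List.eq_replicate_iff]
  constructor
  · simp
  · intro x hx
    rcases List.mem_cons.mp hx with h | h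
    · exact h
    · have := List.mem_takeWhile_imp h
      simpa using this

-- main invariant lemma: on a sorted list, A's element fold equals B's run fold
lemma fold_runs : ∀ (l : List Int), l.Pairwise (· ≤ ·) → ∀ g m : Int,
    0 ≤ m → (∀ x ∈ l, 1 ≤ x → m < x) →
      l.foldl astep (g, m) = (runsB l).foldl bstep (g, m) := by
  intro l
  induction l using runsB.induct with
  | case1 => intro _ g m _ _; simp [runsB]
  | case2 a t ih =>
      intro hs g m hm hinv
      have hsplit : a :: t = (a :: t.takeWhile (· == a)) ++ t.dropWhile (· == a) := by
        simp [List.takeWhile_append_dropWhile]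
      have hrest_sub : (t.dropWhile (· == a)).Sublist t := List.dropWhile_sublist _
      have hst : t.Pairwise (· ≤ ·) := (List.pairwise_cons.mp hs).2
      have hat : ∀ x ∈ t, a ≤ x := (List.pairwise_cons.mp hs).1
      have hma : 1 ≤ a → m < a := fun h1 => hinv a (by simp) h1
      -- fold over the first run
      have hrun : (a :: t.takeWhile (· == a)).foldl astep (g, m)
          = bstep (g, m) (a, ((t.takeWhile (· == a)).length : Int) + 1) := by
        rw [takeWhile_eq_replicate]
        exact run_lemma _ a g m hm hma
      have hruns : runsB (a :: t)
          = (a, ((t.takeWhile (· == a)).length : Int) + 1) :: runsB (t.dropWhile (· == a)) := by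
        simp [runsB]
      -- the state after the run
      set s' := bstep (g, m) (a, ((t.takeWhile (· == a)).length : Int) + 1) with hs'
      have hs'2 : 0 ≤ s'.2 ∧ (∀ x ∈ t.dropWhile (· == a), 1 ≤ x → s'.2 < x) := by
        by_cases hf : a ≤ 0
        · constructor
          · simp [hs', bstep, hf]
          · intro x hx h1
            simp [hs', bstep, hf]; omega
        · have hfpos : (0:Int) < a := by omega
          have h2 : s'.2 = PySem.Int.mod (m + (((t.takeWhile (· == a)).length : Int) + 1)) a := by
            simp [hs', bstep, hf]
          have hlt : s'.2 < a := by rw [h2]; exact PySem.Int.mod_lt _ hfpos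
          constructor
          · rw [h2]; exact PySem.Int.mod_nonneg _ hfpos
          · intro x hx _
            have : a ≤ x := hat x (hrest_sub.mem hx)
            omega
      conv_lhs => rw [hsplit]
      rw [List.foldl_append, hrun, hruns, List.foldl_cons, ← hs']
      exact ih (hst.sublist hrest_sub) s'.1 s'.2 hs'2.1 hs'2.2

-- ===== VERDICT (by name: the statement is the Claim_ definition above) =====
theorem solution_spec : Claim_equal_solution := by
  intro n afs _
  unfold Spec_solution
  have hp : (PySem.List.sorted afs (fun x => x) false).Pairwise (· ≤ ·) := by
    simpa using PySem.List.sorted_pairwise afs (fun x => x)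
  have hA : solution n afs
      = ((PySem.List.sorted afs (fun x => x) false).foldl astep (0, 0)).1 := rfl
  have hB : solution_alt n afs
      = ((runsB (PySem.List.sorted afs (fun x => x) false)).foldl bstep (0, 0)).1 := rfl
  rw [hA, hB, fold_runs _ hp 0 0 le_rfl (fun x _ h1 => by omega)]
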